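-- pv_equiv track=rewrite | github.com/0801margarida/PL2025-A96060 | TPC2/analise.py | titulos_por_periodo
-- ===== SOURCE A (Python) =====
-- def titulos_por_periodo(dados):
--     titulos_por_periodo = {}
--     for obra in dados:
--         periodo = obra.get('periodo', 'Desconhecido')  # Usa 'Desconhecido' se a chave não existir
--         titulo = obra.get('nome', 'Sem título')  # Usa 'Sem título' se a chave não existir
--         if periodo in titulos_por_periodo:
--             titulos_por_periodo[periodo].append(titulo)
--         else:
--             titulos_por_periodo[periodo] = [titulo]
--     for periodo in titulos_por_periodo:
--         titulos_por_periodo[periodo].sort()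
--     return titulos_por_periodo
-- ===== SOURCE B (Python) =====
-- def titulos_por_periodo(dados):
--     pares = [(o.get('periodo', 'Desconhecido'), o.get('nome', 'Sem título')) for o in dados]
--     ordenados = sorted(pares, key=lambda pt: pt[1])
--     return {p: [t for q, t in ordenados if q == p]
--             for p in dict.fromkeys(q for q, _ in pares)}
-- ===== Notes on version B (the rewrite author's own statement) =====
-- stated objective: alternative
-- what changed: Instead of building buckets incrementally and sorting each bucket afterwards, B sorts the (periodo, titulo) pairs by title once up front and builds the dict as a comprehension over the first-occurrence-deduplicated periods, each bucket a filter of the globally sorted list, eliminating the per-group sort pass.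
import Mathlib
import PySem

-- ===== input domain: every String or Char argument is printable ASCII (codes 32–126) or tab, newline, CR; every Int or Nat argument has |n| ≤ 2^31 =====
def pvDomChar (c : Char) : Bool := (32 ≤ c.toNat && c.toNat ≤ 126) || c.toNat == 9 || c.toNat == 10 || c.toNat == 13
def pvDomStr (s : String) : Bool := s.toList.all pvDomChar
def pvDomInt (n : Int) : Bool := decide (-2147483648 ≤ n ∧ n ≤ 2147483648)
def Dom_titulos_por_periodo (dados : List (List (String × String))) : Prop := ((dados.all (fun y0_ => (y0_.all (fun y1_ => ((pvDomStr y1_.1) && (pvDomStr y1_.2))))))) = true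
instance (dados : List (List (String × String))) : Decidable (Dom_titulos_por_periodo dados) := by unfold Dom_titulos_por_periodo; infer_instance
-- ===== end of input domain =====

-- B sorts the (periodo, titulo) pairs by title once, then builds each period's bucket by
-- filtering the sorted list over first-occurrence-deduplicated periods — no per-group sort
-- and no incremental dict (objective: alternative).


-- ===== PORT A =====
def titulos_por_periodo (dados : List (List (String × String))) : List (String × List String) :=
  let d := dados.foldl (fun d obra =>
    let periodo := (PySem.Dict.mk obra).getD "periodo" "Desconhecido"
    let titulo := (PySem.Dict.mk obra).getD "nome" "Sem título"
    if d.contains periodo then d.modify periodo [] (fun l => l ++ [titulo])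
    else d.insert periodo [titulo]) (PySem.Dict.empty : PySem.Dict String (List String))
  d.items.map (fun p => (p.1, PySem.List.sorted p.2 (fun x => x) false))

-- ===== PORT B =====
def titulos_por_periodo_alt (dados : List (List (String × String))) : List (String × List String) :=
  let pares := dados.map (fun o =>
    ((PySem.Dict.mk o).getD "periodo" "Desconhecido", (PySem.Dict.mk o).getD "nome" "Sem título"))
  let ordenados := PySem.List.sorted pares (fun pt => pt.2) false
  (PySem.List.dedup (pares.map (fun q => q.1))).map (fun p =>
    (p, (ordenados.filter (fun q => q.1 == p)).map (fun q => q.2)))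

-- ===== PRECONDITION & SPEC =====
def Spec_titulos_por_periodo (dados : List (List (String × String))) (out : List (String × List String)) : Prop := out = titulos_por_periodo_alt dados
instance (dados : List (List (String × String))) (out : List (String × List String)) : Decidable (Spec_titulos_por_periodo dados out) := by unfold Spec_titulos_por_periodo; infer_instance

-- ===== CLAIM (what is proved, stated in full; the proofs are below) =====
def Claim_equal_titulos_por_periodo : Prop := ∀ (dados : List (List (String × String))), Dom_titulos_por_periodo dados → Spec_titulos_por_periodo dados (titulos_por_periodo dados)

-- ===== LEMMAS AND PROOFS =====

theorem step_eq_modify (d : PySem.Dict String (List String)) (p t : String) :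
    (if d.contains p then d.modify p [] (fun l => l ++ [t]) else d.insert p [t]) =
      d.modify p [] (fun l => l ++ [t]) := by
  by_cases h : d.contains p
  · simp [h]
  · have h' : d.contains p = false := by simpa using h
    simp [h', PySem.Dict.modify, PySem.Dict.getD_of_not_contains]

theorem bucket_eq (pares : List (String × String)) (k : String) :
    PySem.List.sorted ((pares.filter (fun q => q.1 == k)).map (fun q => q.2)) (fun x => x) false =
      ((PySem.List.sorted pares (fun pt => pt.2) false).filter (fun q => q.1 == k)).map (fun q => q.2) := by
  apply PySem.List.sorted_id_eq_of_perm_of_pairwise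
  · exact ((PySem.List.sorted_perm pares (fun pt => pt.2) false).filter _).map _
  · rw [List.pairwise_map]
    exact (PySem.List.sorted_pairwise pares (fun pt => pt.2)).filter _

theorem core_eq (pares : List (String × String)) :
    ((pares.foldl (fun d q => d.modify q.1 [] (fun v => v ++ [q.2]))
        (PySem.Dict.empty : PySem.Dict String (List String))).items.map
      (fun p => (p.1, PySem.List.sorted p.2 (fun x => x) false)))
    = (PySem.List.dedup (pares.map (fun q => q.1))).map (fun p =>
        (p, ((PySem.List.sorted pares (fun pt => pt.2) false).filter (fun q => q.1 == p)).map
          (fun q => q.2))) := by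
  have hnd : (pares.foldl (fun d q => d.modify q.1 [] (fun v => v ++ [q.2]))
      (PySem.Dict.empty : PySem.Dict String (List String))).keys.Nodup := by
    apply PySem.Dict.nodup_keys_foldl_modify_key
    simp
  rw [PySem.Dict.items_eq_map_keys _ hnd []]
  rw [PySem.Dict.keys_foldl_modify_key]
  simp only [PySem.Dict.keys_empty, PySem.List.dedup_eq_ofList, List.map_map]
  have hupd : PySem.Set.update ([] : List String) (pares.map (fun q => q.1))
      = PySem.Set.ofList (pares.map (fun q => q.1)) := rfl
  rw [hupd]
  apply List.map_congr_left
  intro k hk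
  simp only [Function.comp]
  rw [PySem.Dict.getD_foldl_modify_append]
  simp only [PySem.Dict.getD_empty, List.nil_append]
  exact congrArg (fun v => (k, v)) (bucket_eq pares k)

theorem pv_main (dados : List (List (String × String))) :
    titulos_por_periodo dados = titulos_por_periodo_alt dados := by
  simp only [titulos_por_periodo, titulos_por_periodo_alt]
  have hfun : (fun (d : PySem.Dict String (List String)) (obra : List (String × String)) =>
      if d.contains ((PySem.Dict.mk obra).getD "periodo" "Desconhecido") then
        d.modify ((PySem.Dict.mk obra).getD "periodo" "Desconhecido") []
          (fun l => l ++ [(PySem.Dict.mk obra).getD "nome" "Sem título"])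
      else d.insert ((PySem.Dict.mk obra).getD "periodo" "Desconhecido")
          [(PySem.Dict.mk obra).getD "nome" "Sem título"])
    = fun d obra => d.modify ((PySem.Dict.mk obra).getD "periodo" "Desconhecido") []
        (fun l => l ++ [(PySem.Dict.mk obra).getD "nome" "Sem título"]) := by
    funext d obra
    exact step_eq_modify d _ _
  rw [hfun]
  have hfm : dados.foldl (fun d obra => d.modify ((PySem.Dict.mk obra).getD "periodo" "Desconhecido") []
        (fun l => l ++ [(PySem.Dict.mk obra).getD "nome" "Sem título"])) PySem.Dict.empty
      = ((dados.map (fun o => ((PySem.Dict.mk o).getD "periodo" "Desconhecido",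
          (PySem.Dict.mk o).getD "nome" "Sem título"))).foldl
          (fun d q => d.modify q.1 [] (fun v => v ++ [q.2])) PySem.Dict.empty) :=
    by rw [List.foldl_map]
  rw [hfm]
  exact core_eq _

-- ===== VERDICT (by name: the statement is the Claim_ definition above) =====
theorem titulos_por_periodo_spec : Claim_equal_titulos_por_periodo := by
  intro dados _
  unfold Spec_titulos_por_periodo
  exact pv_main dados
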